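-- pv_equiv track=rewrite | github.com/TimothySjiang/leetcodepy | Min_Moves_Make_String_Without_3_Identical_Consecutive_Letters.py | count
-- ===== SOURCE A (Python) =====
-- def count(str):
--     count = 0
--     i = 0
--     while i < len(str)-2:
--         if str[i] == str[i+1] and str[i] == str[i+2]:
--             j = i+3
--             while j < len(str) and str[j] == str[i]:
--                 j += 1
--             count += (j-i)//3
--             i = j
--         else:
--             i += 1
--     return count
-- ===== SOURCE B (Python) =====
-- def count(str):
--     ans = 0
--     run = 0
--     prev = None
--     for ch in str:
--         run = run + 1 if prev == ch else 1
--         if run == 3: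
--             ans += 1
--             run = 0
--         prev = ch
--     return ans
-- ===== Notes on version B (the rewrite author's own statement) =====
-- stated objective: simpler
-- what changed: Replaces A's index loop with an inner run-scan and (j-i)//3 batch arithmetic by a single flat pass keeping a run counter that counts and resets each time it reaches 3.
import Mathlib
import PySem

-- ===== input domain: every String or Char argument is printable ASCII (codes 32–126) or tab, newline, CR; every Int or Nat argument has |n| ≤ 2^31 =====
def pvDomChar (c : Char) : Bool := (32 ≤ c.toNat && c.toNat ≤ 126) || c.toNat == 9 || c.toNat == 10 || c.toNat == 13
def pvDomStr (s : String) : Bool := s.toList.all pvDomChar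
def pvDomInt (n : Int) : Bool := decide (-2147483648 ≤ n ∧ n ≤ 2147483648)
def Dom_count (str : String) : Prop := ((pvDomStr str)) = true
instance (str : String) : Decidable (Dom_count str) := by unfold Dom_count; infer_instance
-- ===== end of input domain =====

-- B replaces A's run-scan-and-jump with (j-i)//3 batch arithmetic by a single flat
-- pass keeping a run counter that counts and resets each time it reaches 3 (simpler).

-- ===== PORT A =====
-- inner while: j advances while j < len(str) and str[j] == str[i]
-- (fuel is a structural-termination guard only; it is always ample at the call sites)
def pyA_scan (s : List Char) (c : Char) (j : Nat) (fuel : Nat) : Nat :=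
  match fuel with
  | 0 => j
  | f + 1 =>
    if h : j < s.length then
      if s[j] = c then pyA_scan s c (j + 1) f else j
    else j

-- outer while over index i; 'i < len(str)-2' on Python ints equals 'i + 2 < len' here
def pyA_loop (s : List Char) (i : Nat) (acc : Int) (fuel : Nat) : Int :=
  match fuel with
  | 0 => acc
  | f + 1 =>
    if h : i + 2 < s.length then
      if s[i] = s[i + 1] ∧ s[i] = s[i + 2] then
        pyA_loop s (pyA_scan s s[i] (i + 3) s.length)
          (acc + PySem.Int.floordiv ((pyA_scan s s[i] (i + 3) s.length : Int) - (i : Int)) 3) f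
      else
        pyA_loop s (i + 1) acc f
    else acc

def count (str : String) : Int := pyA_loop str.toList 0 0 str.toList.length

-- ===== PORT B =====
-- one fold step: state = (prev, run, ans)
def bStep (st : Option Char × Nat × Int) (c : Char) : Option Char × Nat × Int :=
  let run := if st.1 = some c then st.2.1 + 1 else 1
  if run = 3 then (some c, 0, st.2.2 + 1) else (some c, run, st.2.2)

def count_alt (str : String) : Int := (str.toList.foldl bStep (none, 0, 0)).2.2

-- ===== PRECONDITION & SPEC =====
def Spec_count (str : String) (out : Int) : Prop := out = count_alt str
instance (str : String) (out : Int) : Decidable (Spec_count str out) := by unfold Spec_count; infer_instance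

-- ===== CLAIM (what is proved, stated in full; the proofs are below) =====
def Claim_equal_count : Prop := ∀ (str : String), Dom_count str → Spec_count str (count str)

-- ===== LEMMAS AND PROOFS =====

-- common specification: sum over maximal runs of ⌊len/3⌋
def runsSum : List Char → Int
  | [] => 0
  | a :: t =>
    let k := (t.takeWhile (fun x => x = a)).length
    (((1 + k) / 3 : Nat) : Int) + runsSum (t.drop k)
termination_by l => l.length
decreasing_by
  have hk : (t.takeWhile (fun x => x = a)).length ≤ t.length :=
    (List.takeWhile_sublist _).length_le
  simp only [List.length_drop, List.length_cons]; omega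

theorem runsSum_nil : runsSum [] = 0 := by rw [runsSum]

theorem runsSum_cons (a : Char) (t : List Char) :
    runsSum (a :: t) = (((1 + (t.takeWhile (fun x => x = a)).length) / 3 : Nat) : Int) +
      runsSum (t.drop (t.takeWhile (fun x => x = a)).length) := by
  rw [runsSum]

theorem runsSum_short (l : List Char) (h : l.length ≤ 2) : runsSum l = 0 := by
  match l with
  | [] => exact runsSum_nil
  | a :: t =>
    rw [runsSum_cons]
    have hk : (t.takeWhile (fun x => x = a)).length ≤ t.length :=
      (List.takeWhile_sublist _).length_le
    have h1 : (1 + (t.takeWhile (fun x => x = a)).length) / 3 = 0 := by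
      simp at h; omega
    have h2 : runsSum (t.drop (t.takeWhile (fun x => x = a)).length) = 0 := by
      apply runsSum_short
      simp only [List.length_drop]
      simp at h; omega
    simp [h1, h2]
termination_by l.length
decreasing_by simp only [List.length_drop, List.length_cons]; omega

theorem pyA_scan_eq (fuel : Nat) (s : List Char) (c : Char) (j : Nat)
    (hf : s.length ≤ j + fuel) :
    pyA_scan s c j fuel = j + ((s.drop j).takeWhile (fun x => x = c)).length := by
  induction fuel generalizing j with
  | zero =>
    have : s.drop j = [] := List.drop_eq_nil_of_le (by omega)
    simp [pyA_scan, this]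
  | succ f ih =>
    rw [pyA_scan]
    split_ifs with h1 h2
    · have ihj := ih (j + 1) (by omega)
      have hd : s.drop j = s[j] :: s.drop (j + 1) := List.drop_eq_getElem_cons h1
      rw [hd, List.takeWhile_cons]
      simp only [h2, decide_true, if_true, List.length_cons]
      omega
    · have hd : s.drop j = s[j] :: s.drop (j + 1) := List.drop_eq_getElem_cons h1
      rw [hd, List.takeWhile_cons]
      simp [h2]
    · have : s.drop j = [] := List.drop_eq_nil_of_le (by omega)
      simp [this]

theorem pyA_loop_eq (fuel : Nat) (s : List Char) (i : Nat) (acc : Int)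
    (hf : s.length ≤ i + fuel + 2) :
    pyA_loop s i acc fuel = acc + runsSum (s.drop i) := by
  induction fuel generalizing i acc with
  | zero =>
    have hlen : (s.drop i).length ≤ 2 := by simp only [List.length_drop]; omega
    rw [pyA_loop, runsSum_short _ hlen]; ring
  | succ f ihf =>
    rw [pyA_loop]
    split_ifs with h hc
    · -- triple found at i
      obtain ⟨hab, hac⟩ := hc
      have hd0 : s.drop i = s[i] :: s.drop (i + 1) := List.drop_eq_getElem_cons (by omega)
      have hd1 : s.drop (i + 1) = s[i + 1] :: s.drop (i + 2) := List.drop_eq_getElem_cons (by omega)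
      have hd2 : s.drop (i + 2) = s[i + 2] :: s.drop (i + 3) := List.drop_eq_getElem_cons (by omega)
      set k' := ((s.drop (i + 3)).takeWhile (fun x => x = s[i])).length with hk'
      have hscan : pyA_scan s s[i] (i + 3) s.length = i + 3 + k' := by
        rw [pyA_scan_eq s.length s s[i] (i + 3) (by omega)]
      have hk'le : k' ≤ s.length - (i + 3) := by
        have := (List.takeWhile_sublist (l := s.drop (i + 3)) (fun x => decide (x = s[i]))).length_le
        simp only [List.length_drop] at this
        omega
      have ih := ihf (i + 3 + k')
        (acc + PySem.Int.floordiv ((i + 3 + k' : Nat) - (i : Nat) : Int) 3) (by omega)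
      rw [hscan]
      push_cast at ih ⊢
      rw [ih]
      have hfd : PySem.Int.floordiv ((i : Int) + 3 + (k' : Int) - (i : Int)) 3
          = (((3 + k') / 3 : Nat) : Int) := by
        have he : (i : Int) + 3 + (k' : Int) - (i : Int) = ((3 + k' : Nat) : Int) := by
          push_cast; ring
        rw [he]
        exact_mod_cast PySem.Int.floordiv_natCast (3 + k') 3
      rw [hfd]
      have htw : ((s.drop (i + 1)).takeWhile (fun x => x = s[i])).length = 2 + k' := by
        rw [hd1, hd2, List.takeWhile_cons]
        have e1 : (s[i + 1] = s[i]) = True := by simp [← hab]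
        simp only [e1, decide_true, if_true, List.takeWhile_cons]
        have e2 : (s[i + 2] = s[i]) = True := by simp [← hac]
        simp only [e2, decide_true, if_true, List.length_cons]
        omega
      have hdrop : (s.drop (i + 1)).drop (2 + k') = s.drop (i + 3 + k') := by
        rw [List.drop_drop]; congr 1; omega
      have hrs : runsSum (s.drop i)
          = (((3 + k') / 3 : Nat) : Int) + runsSum (s.drop (i + 3 + k')) := by
        rw [hd0, runsSum_cons, htw, hdrop]
        have h13 : 1 + (2 + k') = 3 + k' := by omega
        rw [h13]
      rw [hrs]; push_cast; ring
    · -- no triple at i: step by one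
      have ih := ihf (i + 1) acc (by omega)
      rw [ih]
      have hd0 : s.drop i = s[i] :: s.drop (i + 1) := List.drop_eq_getElem_cons (by omega)
      have hd1 : s.drop (i + 1) = s[i + 1] :: s.drop (i + 2) := List.drop_eq_getElem_cons (by omega)
      have hd2 : s.drop (i + 2) = s[i + 2] :: s.drop (i + 3) := List.drop_eq_getElem_cons (by omega)
      by_cases hab : s[i] = s[i + 1]
      · have hac : ¬ s[i] = s[i + 2] := fun hh => hc ⟨hab, hh⟩
        have e1 : runsSum (s.drop i) = runsSum (s.drop (i + 2)) := by
          rw [hd0, runsSum_cons]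
          have htw : ((s.drop (i + 1)).takeWhile (fun x => x = s[i])).length = 1 := by
            rw [hd1, hd2, List.takeWhile_cons]
            have e3 : (s[i + 1] = s[i]) = True := by simp [← hab]
            simp only [e3, decide_true, if_true, List.takeWhile_cons]
            have e4 : ¬ (s[i + 2] = s[i]) := fun hh => hac (Eq.symm hh)
            simp [e4]
          rw [htw]
          have : (s.drop (i + 1)).drop 1 = s.drop (i + 2) := by
            rw [List.drop_drop]
          rw [this]
          norm_num
        have e2 : runsSum (s.drop (i + 1)) = runsSum (s.drop (i + 2)) := by
          rw [hd1, runsSum_cons]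
          have htw : ((s.drop (i + 2)).takeWhile (fun x => x = s[i + 1])).length = 0 := by
            rw [hd2, List.takeWhile_cons]
            have e5 : ¬ (s[i + 2] = s[i + 1]) := fun hh => hac (hab.trans (Eq.symm hh))
            simp [e5]
          rw [htw]
          simp
        rw [e1, e2]
      · have e1 : runsSum (s.drop i) = runsSum (s.drop (i + 1)) := by
          rw [hd0, runsSum_cons]
          have htw : ((s.drop (i + 1)).takeWhile (fun x => x = s[i])).length = 0 := by
            rw [hd1, List.takeWhile_cons]
            have e5 : ¬ (s[i + 1] = s[i]) := fun hh => hab (Eq.symm hh)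
            simp [e5]
          rw [htw]
          simp
        rw [e1]
    · -- fewer than 3 chars remain
      have hlen : (s.drop i).length ≤ 2 := by simp only [List.length_drop]; omega
      rw [runsSum_short _ hlen]; ring

-- B-side invariant: folding from state (some a, r, acc) with r < 3
theorem fold_run (l : List Char) (a : Char) (r : Nat) (acc : Int) (hr : r < 3) :
    (l.foldl bStep (some a, r, acc)).2.2 =
      acc + (((r + (l.takeWhile (fun x => x = a)).length) / 3 : Nat) : Int) +
        runsSum (l.drop (l.takeWhile (fun x => x = a)).length) := by
  induction l generalizing a r acc with
  | nil =>
    simp only [List.foldl_nil, List.takeWhile_nil, List.length_nil, List.drop_nil,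
      runsSum_nil, Nat.add_zero]
    have : r / 3 = 0 := by omega
    simp [this]
  | cons c t ih =>
    by_cases hca : c = a
    · subst hca
      rw [List.takeWhile_cons]
      simp only [decide_true, if_true]
      by_cases hr2 : r + 1 = 3
      · have hstep : bStep (some c, r, acc) c = (some c, 0, acc + 1) := by
          simp [bStep, hr2]
        rw [List.foldl_cons, hstep, ih c 0 (acc + 1) (by omega)]
        simp only [List.length_cons, List.drop_succ_cons]
        have he : (r + ((t.takeWhile (fun x => x = c)).length + 1)) / 3
             = 1 + (0 + (t.takeWhile (fun x => x = c)).length) / 3 := by omega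
        rw [he]; push_cast; ring
      · have hstep : bStep (some c, r, acc) c = (some c, r + 1, acc) := by
          simp [bStep, hr2]
        rw [List.foldl_cons, hstep, ih c (r + 1) acc (by omega)]
        simp only [List.length_cons, List.drop_succ_cons]
        have he : r + ((t.takeWhile (fun x => x = c)).length + 1)
             = r + 1 + (t.takeWhile (fun x => x = c)).length := by omega
        rw [he]
    · have hstep : bStep (some a, r, acc) c = (some c, 1, acc) := by
        have hne : ¬ ((some a : Option Char) = some c) := by
          intro hh
          exact hca (Eq.symm (Option.some.inj hh))
        simp [bStep, hne]
      rw [List.takeWhile_cons]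
      have hcd : ¬ (c = a) := hca
      simp only [hcd, decide_false, Bool.false_eq_true, if_false, List.length_nil,
        List.drop_zero]
      rw [List.foldl_cons, hstep, ih c 1 acc (by omega)]
      have hr0 : r / 3 = 0 := by omega
      rw [runsSum_cons]
      simp only [Nat.add_zero, hr0]
      push_cast; ring

theorem count_alt_eq_runsSum (l : List Char) :
    (l.foldl bStep (none, 0, 0)).2.2 = runsSum l := by
  match l with
  | [] => simp [runsSum_nil]
  | a :: t =>
    have hstep : bStep (none, 0, (0 : Int)) a = (some a, 1, 0) := by
      simp [bStep]
    rw [List.foldl_cons, hstep, fold_run t a 1 0 (by omega), runsSum_cons]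
    push_cast; ring

-- ===== VERDICT (by name: the statement is the Claim_ definition above) =====
theorem count_spec : Claim_equal_count := by
  intro str _
  unfold Spec_count count count_alt
  rw [pyA_loop_eq str.toList.length str.toList 0 0 (by omega), count_alt_eq_runsSum]
  simp
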